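-- pv_equiv track=rewrite | github.com/pc5401/my_BOJ | 백준/Silver/10709. 기상캐스터/기상캐스터.py | solve
-- ===== SOURCE A (Python) =====
-- def solve(H: int, W: int, world: list[str]) -> list[int]:
--     rtn = [[-1] * W for _ in range(H)]
--
--     for i in range(H): # 초기화
--         for j in range(W):
--             if world[i][j] == 'c':
--                 rtn[i][j] = 0
--
--     for i in range(H):
--         for j in range(1, W):
--             if rtn[i][j - 1] >= 0 and rtn[i][j] == -1:
--                 rtn[i][j] = rtn[i][j - 1] + 1
--
--     return rtn
-- ===== SOURCE B (Python) =====
-- def solve(H: int, W: int, world: list[str]) -> list[int]: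
--     # Index-based segment construction: per row, collect the cloud column
--     # positions once, then build the row as a prefix of -1s followed by one
--     # literal range(...) block per cloud segment (no per-cell state or branch).
--     res = []
--     for i in range(H):
--         cols = [j for j in range(W) if world[i][j] == 'c']
--         row = [-1] * (cols[0] if cols else W)
--         for p, q in zip(cols, cols[1:] + [W]):
--             row += list(range(q - p))
--         res.append(row)
--     return res
-- ===== Notes on version B (the rewrite author's own statement) =====
-- stated objective: alternative
-- what changed: Instead of A's two grid passes (mark clouds in a -1 grid, then propagate distances cell-by-cell reading the partly-updated grid back), B first collects the cloud column positions of each row and then constructs the row directly as a -1 prefix plus one range(q-p) block per consecutive cloud pair, with no per-cell state or conditional.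
import Mathlib
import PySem

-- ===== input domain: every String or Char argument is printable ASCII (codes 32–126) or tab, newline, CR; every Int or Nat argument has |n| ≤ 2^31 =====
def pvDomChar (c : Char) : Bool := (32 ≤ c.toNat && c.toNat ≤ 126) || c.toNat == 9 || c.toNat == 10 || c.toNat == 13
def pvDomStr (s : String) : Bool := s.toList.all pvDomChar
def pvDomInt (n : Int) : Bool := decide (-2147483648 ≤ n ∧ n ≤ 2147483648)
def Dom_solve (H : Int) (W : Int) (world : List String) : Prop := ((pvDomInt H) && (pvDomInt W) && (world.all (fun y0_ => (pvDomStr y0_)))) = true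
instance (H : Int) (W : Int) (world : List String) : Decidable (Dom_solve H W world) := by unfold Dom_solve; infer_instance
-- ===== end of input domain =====

-- B replaces A's two grid passes (mark clouds in a -1 grid, then propagate
-- cell-by-cell reading the partly-updated grid back) with an index of each
-- row's cloud columns and direct segment construction; objective: alternative.

-- ===== PORT A =====
def solve (H : Int) (W : Int) (world : List String) : List (List Int) :=
  (PySem.List.pyRange 0 H 1).foldl (fun rtn i =>
    (PySem.List.pyRange 1 W 1).foldl (fun rtn j =>
      if 0 ≤ PySem.List.pyGetD (PySem.List.pyGetD rtn i []) (j - 1) 0 ∧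
         PySem.List.pyGetD (PySem.List.pyGetD rtn i []) j 0 = -1 then
        PySem.List.pySetD rtn i
          (PySem.List.pySetD (PySem.List.pyGetD rtn i []) j
            (PySem.List.pyGetD (PySem.List.pyGetD rtn i []) (j - 1) 0 + 1))
      else rtn) rtn)
    ((PySem.List.pyRange 0 H 1).foldl (fun rtn i =>
      (PySem.List.pyRange 0 W 1).foldl (fun rtn j =>
        if PySem.Str.pyGet? (PySem.List.pyGetD world i "") j = some 'c' then
          PySem.List.pySetD rtn i (PySem.List.pySetD (PySem.List.pyGetD rtn i []) j 0)
        else rtn) rtn)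
      ((PySem.List.pyRange 0 H 1).map (fun _ => List.replicate W.toNat (-1 : Int))))

-- ===== PORT B =====
-- cols = [j for j in range(W) if world[i][j] == 'c']; row = [-1]*(cols[0] if cols else W);
-- for p, q in zip(cols, cols[1:] + [W]): row += list(range(q - p))
def solveAltRow (s : String) (W : Int) : List Int :=
  let cols : List Int :=
    (PySem.List.pyRange 0 W 1).filter (fun j => PySem.Str.pyGet? s j == some 'c')
  let row0 : List Int :=
    List.replicate (match cols with | [] => W | c :: _ => c).toNat (-1 : Int)
  (cols.zip (cols.drop 1 ++ [W])).foldl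
    (fun row pq => row ++ PySem.List.pyRange 0 (pq.2 - pq.1) 1) row0

def solve_alt (H : Int) (W : Int) (world : List String) : List (List Int) :=
  (PySem.List.pyRange 0 H 1).foldl
    (fun acc i => acc ++ [solveAltRow (PySem.List.pyGetD world i "") W]) []

-- ===== PRECONDITION & SPEC =====
-- Pre_ excludes exactly the inputs where A raises IndexError: a positive H, W
-- grid needs H rows and each of the first H rows needs at least W characters.
def Pre_solve (H : Int) (W : Int) (world : List String) : Prop :=
  0 < H → 0 < W →
    (H ≤ (world.length : Int) ∧ ∀ s ∈ world.take H.toNat, W ≤ (s.toList.length : Int))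
instance (H : Int) (W : Int) (world : List String) : Decidable (Pre_solve H W world) := by
  unfold Pre_solve; infer_instance

def pvWitness_solve : Int × Int × List String := (2, 3, ["c..", ".cc"])

def Spec_solve (H : Int) (W : Int) (world : List String) (out : List (List Int)) : Prop := out = solve_alt H W world
instance (H : Int) (W : Int) (world : List String) (out : List (List Int)) : Decidable (Spec_solve H W world out) := by unfold Spec_solve; infer_instance

-- ===== CLAIM (what is proved, stated in full; the proofs are below) =====
def Claim_equal_solve : Prop := ∀ (H : Int) (W : Int) (world : List String), Dom_solve H W world → Pre_solve H W world → Spec_solve H W world (solve H W world)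

-- ===== LEMMAS AND PROOFS =====

-- Final value at column k of a row with characters cs (distance to the
-- nearest 'c' at or to the left, -1 if none).
def P (cs : List Char) : Nat → Int
  | 0 => if cs.getD 0 ' ' = 'c' then 0 else -1
  | k+1 => if cs.getD (k+1) ' ' = 'c' then 0 else if 0 ≤ P cs k then P cs k + 1 else -1

-- Value after A's first pass.
def I (cs : List Char) (k : Nat) : Int := if cs.getD k ' ' = 'c' then 0 else -1

theorem set_getD_self {α : Type} (d : α) (l : List α) (n : Nat) (h : n < l.length) :
    l.set n (l.getD n d) = l := by
  apply List.ext_getElem (by simp)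
  intro k hk _
  rw [List.getElem_set]
  split
  · subst k; simp [h]
  · rfl

-- Inner j-loop that only reads and rewrites row i of the grid factors
-- through that row.
theorem inner_fold_row (js : List Int) (c : List Int → Int → Prop)
    [inst : ∀ r j, Decidable (c r j)] (u : List Int → Int → List Int)
    (g : List (List Int)) (n : Nat) (h : n < g.length) :
    js.foldl (fun g' j =>
        if c (g'.getD n []) j then g'.set n (u (g'.getD n []) j) else g') g
      = g.set n (js.foldl (fun r j => if c r j then u r j else r) (g.getD n [])) := by
  induction js generalizing g with
  | nil => exact (set_getD_self [] g n h).symm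
  | cons j js ih =>
    simp only [List.foldl_cons]
    by_cases hc : c (g.getD n []) j
    · rw [if_pos hc, if_pos hc, ih _ (by simpa using h)]
      simp [List.getD, List.set_set, h]
    · rw [if_neg hc, if_neg hc, ih _ h]

-- A fold over range(0, m) whose step rewrites exactly the cell at its index,
-- as a function of that cell, is a map.
theorem fold_range_set {α : Type} (d : α) (F : Int → α → α)
    (step : List α → Int → List α)
    (hstep : ∀ g i, 0 ≤ i → i.toNat < g.length →
      step g i = g.set i.toNat (F i (g.getD i.toNat d))) :
    ∀ (m : Nat) (rows : List α), m ≤ rows.length →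
      (PySem.List.pyRange 0 (m : Int) 1).foldl step rows
        = (List.range rows.length).map
            (fun k => if k < m then F k (rows.getD k d) else rows.getD k d) := by
  intro m
  induction m with
  | zero =>
    intro rows _
    simp [PySem.List.pyRange_one_eq_nil]
    apply List.ext_getElem (by simp)
    intro k hk _
    simp [hk]
  | succ m ih =>
    intro rows hm
    have h1 : ((m + 1 : Nat) : Int) = (m : Int) + 1 := by push_cast; ring
    rw [h1, PySem.List.pyRange_one_succ_right (by positivity), List.foldl_append]
    rw [ih rows (by omega)]
    set X := (List.range rows.length).map
        (fun k => if k < m then F k (rows.getD k d) else rows.getD k d) with hX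
    have hXlen : X.length = rows.length := by simp [hX]
    have hXm : X.getD m d = rows.getD m d := by
      simp [hX, Nat.lt_of_lt_of_le (Nat.lt_succ_self m) hm]
    simp only [List.foldl_cons, List.foldl_nil]
    rw [hstep X m (by positivity)
      (by simpa [hXlen] using (by omega : m < rows.length))]
    simp only [Int.toNat_natCast, hXm]
    apply List.ext_getElem (by simp [hXlen])
    intro k hk hk'
    rw [List.getElem_set]
    have hklen : k < rows.length := by simpa [hXlen] using hk
    by_cases hkm : k = m
    · subst k
      simp [hklen]
    · have hmk : ¬ m = k := fun h => hkm h.symm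
      simp [hX, hklen, hkm, hmk]
      by_cases h2 : k < m
      · simp [h2, Nat.lt_succ_of_lt h2, Nat.le_of_lt h2]
      · have h3 : ¬ k < m + 1 := by omega
        have h4 : ¬ k ≤ m := by omega
        simp [h2, h3, h4]

-- Row-level view of A's two inner loops.
def rowPass1 (s : String) (W : Int) (r : List Int) : List Int :=
  (PySem.List.pyRange 0 W 1).foldl
    (fun r j => if PySem.Str.pyGet? s j = some 'c' then PySem.List.pySetD r j 0 else r) r

def rowPass2 (W : Int) (r : List Int) : List Int :=
  (PySem.List.pyRange 1 W 1).foldl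
    (fun r j =>
      if 0 ≤ PySem.List.pyGetD r (j - 1) 0 ∧ PySem.List.pyGetD r j 0 = -1 then
        PySem.List.pySetD r j (PySem.List.pyGetD r (j - 1) 0 + 1)
      else r) r

theorem pyRange_zero_toNat (H : Int) :
    PySem.List.pyRange 0 H 1 = PySem.List.pyRange 0 ((H.toNat : Nat) : Int) 1 := by
  rw [PySem.List.pyRange_one, PySem.List.pyRange_one]
  have : (H - 0).toNat = (((H.toNat : Nat) : Int) - 0).toNat := by omega
  rw [this]

theorem solve_eq_rows (H W : Int) (world : List String) :
    solve H W world
      = (List.range H.toNat).map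
          (fun k => rowPass2 W
            (rowPass1 (world.getD k "") W (List.replicate W.toNat (-1)))) := by
  unfold solve
  rw [pyRange_zero_toNat H]
  have hlen0 : ((PySem.List.pyRange 0 ((H.toNat : Nat) : Int) 1).map
      (fun _ => List.replicate W.toNat (-1 : Int))).length = H.toNat := by
    simp [PySem.List.length_pyRange_one]
    omega
  rw [fold_range_set ([] : List Int)
    (fun i r => rowPass1 (PySem.List.pyGetD world i "") W r) _
    (by
      intro g i hi hil
      obtain ⟨n, rfl⟩ : ∃ n : Nat, i = (n : Int) := ⟨i.toNat, (Int.toNat_of_nonneg hi).symm⟩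
      simp only [PySem.List.pySetD_natCast, PySem.List.pyGetD_natCast, Int.toNat_natCast]
      exact inner_fold_row _
        (fun _ j => PySem.Str.pyGet? (world.getD n "") j = some 'c')
        (fun r j => PySem.List.pySetD r j 0) g n (by simpa using hil))
    H.toNat _ (le_of_eq hlen0.symm)]
  have hG1 : (List.map
        (fun k =>
          if k < H.toNat then
            rowPass1 (PySem.List.pyGetD world (↑k) "") W
              ((List.map (fun _ => List.replicate W.toNat (-1 : Int)) (PySem.List.pyRange 0 ((H.toNat : Nat) : Int) 1)).getD k [])
          else (List.map (fun _ => List.replicate W.toNat (-1 : Int)) (PySem.List.pyRange 0 ((H.toNat : Nat) : Int) 1)).getD k [])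
        (List.range (List.map (fun _ => List.replicate W.toNat (-1 : Int)) (PySem.List.pyRange 0 ((H.toNat : Nat) : Int) 1)).length))
      = (List.range H.toNat).map
          (fun k => rowPass1 (world.getD k "") W (List.replicate W.toNat (-1))) := by
    rw [hlen0]
    apply List.map_congr_left
    intro k hk
    rw [List.mem_range] at hk
    rw [if_pos hk, PySem.List.pyGetD_natCast]
    congr 1
    rw [List.getD_eq_getElem?_getD, PySem.List.getElem?_map_pyRange_zero _ _ _ (by omega)]
    rfl
  rw [hG1]
  rw [fold_range_set ([] : List Int) (fun _ r => rowPass2 W r) _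
    (by
      intro g i hi hil
      obtain ⟨n, rfl⟩ : ∃ n : Nat, i = (n : Int) := ⟨i.toNat, (Int.toNat_of_nonneg hi).symm⟩
      simp only [PySem.List.pySetD_natCast, PySem.List.pyGetD_natCast, Int.toNat_natCast]
      exact inner_fold_row _
        (fun r j => 0 ≤ PySem.List.pyGetD r (j - 1) 0 ∧ PySem.List.pyGetD r j 0 = -1)
        (fun r j => PySem.List.pySetD r j (PySem.List.pyGetD r (j - 1) 0 + 1))
        g n (by simpa using hil))
    H.toNat _ (by simp)]
  simp only [List.length_map, List.length_range]
  apply List.map_congr_left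
  intro k hk
  rw [List.mem_range] at hk
  rw [if_pos hk]
  congr 1
  simp [List.getD_eq_getElem?_getD, hk]

theorem rowPass1_eq (s : String) (W : Int) (hlen : W.toNat ≤ s.toList.length) :
    rowPass1 s W (List.replicate W.toNat (-1))
      = (List.range W.toNat).map (I s.toList) := by
  unfold rowPass1
  rw [pyRange_zero_toNat W]
  rw [fold_range_set (0 : Int)
    (fun j old => if PySem.Str.pyGet? s j = some 'c' then 0 else old) _
    (by
      intro r j hj hjl
      by_cases hc : PySem.Str.pyGet? s j = some 'c'
      · beta_reduce
        rw [if_pos hc, if_pos hc, PySem.List.pySetD_of_nonneg r 0 hj]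
      · beta_reduce
        rw [if_neg hc, if_neg hc]
        exact (set_getD_self 0 r j.toNat hjl).symm)
    W.toNat _ (by simp)]
  apply List.ext_getElem (by simp)
  intro k hk hk'
  have hkW : k < W.toNat := by simpa using hk
  have hks : k < s.toList.length := lt_of_lt_of_le hkW hlen
  have hkWi : ((k : Int)) < W := by omega
  simp [hkW, hkWi, I]
  rw [List.getElem?_eq_getElem hks]
  simp

def M (cs : List Char) (w m : Nat) : List Int :=
  (List.range w).map (fun k => if k < m then P cs k else I cs k)

theorem pass2_inv (cs : List Char) (W : Int) :
    ∀ (n m : Nat), 1 ≤ m → m + n = W.toNat →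
      (PySem.List.pyRange (m : Int) W 1).foldl
        (fun r j =>
          if 0 ≤ PySem.List.pyGetD r (j - 1) 0 ∧ PySem.List.pyGetD r j 0 = -1 then
            PySem.List.pySetD r j (PySem.List.pyGetD r (j - 1) 0 + 1)
          else r) (M cs W.toNat m)
      = M cs W.toNat W.toNat := by
  intro n
  induction n with
  | zero =>
    intro m h1 hm
    rw [PySem.List.pyRange_one_eq_nil (by omega)]
    rw [List.foldl_nil]
    rw [show m = W.toNat by omega]
  | succ n ih =>
    intro m h1 hm
    obtain ⟨k, rfl⟩ : ∃ k, m = k + 1 := ⟨m - 1, by omega⟩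
    have hmW : ((k + 1 : Nat) : Int) < W := by omega
    rw [PySem.List.pyRange_one_cons hmW, List.foldl_cons]
    have hsub : ((k + 1 : Nat) : Int) - 1 = (k : Nat) := by push_cast; ring
    have hkw : k < W.toNat := by omega
    have hmw : k + 1 < W.toNat := by omega
    have hgk : PySem.List.pyGetD (M cs W.toNat (k+1)) ((k : Nat) : Int) 0 = P cs k := by
      rw [PySem.List.pyGetD_natCast, M]
      simp [List.getD_eq_getElem?_getD, hkw]
    have hgm : PySem.List.pyGetD (M cs W.toNat (k+1)) ((k + 1 : Nat) : Int) 0 = I cs (k+1) := by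
      rw [PySem.List.pyGetD_natCast, M]
      simp [List.getD_eq_getElem?_getD, hmw]
    have hstep : (if 0 ≤ PySem.List.pyGetD (M cs W.toNat (k+1)) (((k + 1 : Nat) : Int) - 1) 0 ∧
          PySem.List.pyGetD (M cs W.toNat (k+1)) ((k + 1 : Nat) : Int) 0 = -1 then
        PySem.List.pySetD (M cs W.toNat (k+1)) ((k + 1 : Nat) : Int)
          (PySem.List.pyGetD (M cs W.toNat (k+1)) (((k + 1 : Nat) : Int) - 1) 0 + 1)
      else (M cs W.toNat (k+1))) = M cs W.toNat (k+2) := by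
      rw [hsub, hgk, hgm]
      by_cases hcond : 0 ≤ P cs k ∧ I cs (k+1) = -1
      · rw [if_pos hcond]
        rw [PySem.List.pySetD_natCast]
        apply List.ext_getElem (by simp [M])
        intro q hq hq'
        have hqw : q < W.toNat := by simpa [M] using hq'
        rw [List.getElem_set]
        by_cases hqm : q = k + 1
        · subst q
          rw [if_pos rfl]
          simp only [M, List.getElem_map, List.getElem_range]
          rw [if_pos (by omega)]
          have hnc : ¬ cs.getD (k+1) ' ' = 'c' := by
            intro hch
            have : I cs (k+1) = 0 := by rw [I, if_pos hch]
            omega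
          rw [P, if_neg hnc, if_pos hcond.1]
        · rw [if_neg (fun h => hqm h.symm)]
          simp only [M, List.getElem_map, List.getElem_range]
          by_cases hq2 : q < k + 1
          · rw [if_pos hq2, if_pos (by omega)]
          · rw [if_neg hq2, if_neg (by omega)]
      · rw [if_neg hcond]
        apply List.ext_getElem (by simp [M])
        intro q hq hq'
        simp only [M, List.getElem_map, List.getElem_range]
        by_cases hq2 : q < k + 1
        · rw [if_pos hq2, if_pos (by omega)]
        · by_cases hq3 : q = k + 1
          · subst q
            rw [if_neg hq2, if_pos (by omega)]
            by_cases hch : cs.getD (k+1) ' ' = 'c'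
            · rw [I, if_pos hch, P, if_pos hch]
            · have hI : I cs (k+1) = -1 := by rw [I, if_neg hch]
              have hPk : ¬ 0 ≤ P cs k := fun h => hcond ⟨h, hI⟩
              rw [hI, P, if_neg hch, if_neg hPk]
          · rw [if_neg hq2, if_neg (by omega)]
    rw [hstep]
    have hc2 : ((k + 1 : Nat) : Int) + 1 = ((k + 2 : Nat) : Int) := by push_cast; ring
    rw [hc2]
    exact ih (k + 2) (by omega) (by omega)

theorem rowPass2_eq (cs : List Char) (W : Int) :
    rowPass2 W ((List.range W.toNat).map (I cs))
      = (List.range W.toNat).map (P cs) := by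
  unfold rowPass2
  by_cases hw : W.toNat = 0
  · rw [PySem.List.pyRange_one_eq_nil (by omega), List.foldl_nil]
    simp [hw]
  · have hMP : M cs W.toNat W.toNat = (List.range W.toNat).map (P cs) := by
      apply List.map_congr_left
      intro q hq
      rw [List.mem_range] at hq
      rw [if_pos hq]
    have hMI : (List.range W.toNat).map (I cs) = M cs W.toNat 1 := by
      apply List.map_congr_left
      intro q hq
      by_cases hq1 : q < 1
      · have : q = 0 := by omega
        subst q
        rw [if_pos hq1]
        rfl
      · rw [if_neg hq1]
    rw [hMI, ← hMP, show (1 : Int) = ((1 : Nat) : Int) by norm_num]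
    exact pass2_inv cs W (W.toNat - 1) 1 (by omega) (by omega)

-- ===== B-side lemmas =====

-- Before the first cloud the value is -1.
theorem P_prefix (cs : List Char) (j : Nat)
    (h : ∀ k, k ≤ j → cs.getD k ' ' ≠ 'c') : P cs j = -1 := by
  induction j with
  | zero => rw [P, if_neg (h 0 le_rfl)]
  | succ j ih =>
    rw [P, if_neg (h (j+1) le_rfl), ih (fun k hk => h k (by omega))]
    norm_num

-- At offset t after a cloud at p, with no cloud strictly in between, the
-- value is t.
theorem P_seg (cs : List Char) (p : Nat) (hp : cs.getD p ' ' = 'c') :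
    ∀ t, (∀ k, p < k → k ≤ p + t → cs.getD k ' ' ≠ 'c') → P cs (p + t) = (t : Int) := by
  intro t
  induction t with
  | zero =>
    intro _
    have h0 : p + 0 = p := rfl
    rw [h0, Nat.cast_zero]
    cases p with
    | zero => rw [P, if_pos hp]
    | succ q => rw [P, if_pos hp]
  | succ t ih =>
    intro h
    have hpt : p + (t + 1) = (p + t) + 1 := by omega
    rw [hpt, P, if_neg (h ((p+t)+1) (by omega) (by omega)),
      ih (fun k hk1 hk2 => h k hk1 (by omega)), if_pos (by positivity)]
    push_cast; ring

def segInt (p q : Nat) : List Int := (List.range (q - p)).map (fun (t : Nat) => (t : Int))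

-- One block: from a cloud at p, with no cloud in the next n-1 cells, the
-- values are 0..n-1.
theorem seg_block (cs : List Char) (p n : Nat) (hp : cs.getD p ' ' = 'c')
    (h : ∀ k, p < k → k < p + n → cs.getD k ' ' ≠ 'c') :
    (List.range' p n).map (P cs) = segInt p (p + n) := by
  unfold segInt
  rw [show p + n - p = n by omega]
  apply List.ext_getElem (by simp)
  intro t ht _
  simp only [List.getElem_map, List.getElem_range', List.getElem_range]
  rw [show p + 1 * t = p + t by ring]
  have htn : t < n := by simpa using ht
  exact P_seg cs p hp t (fun k hk1 hk2 => h k hk1 (by omega))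

-- Segment decomposition: from a cloud at p onward, the row is the
-- concatenation of one 0..(q-p-1) block per consecutive cloud pair.
theorem seg_main (cs : List Char) (w : Nat) :
    ∀ (cols : List Nat) (p : Nat), p < w → cs.getD p ' ' = 'c' →
      (p :: cols).Pairwise (· < ·) →
      (∀ x ∈ p :: cols, x < w) →
      (∀ x ∈ p :: cols, cs.getD x ' ' = 'c') →
      (∀ k, p ≤ k → k < w → cs.getD k ' ' = 'c' → k ∈ p :: cols) →
      (List.range' p (w - p)).map (P cs)
        = ((p :: cols).zip (cols ++ [w])).flatMap (fun pq => segInt pq.1 pq.2) := by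
  intro cols
  induction cols with
  | nil =>
    intro p hpw hp _ _ _ hall
    have hz : ([p].zip ([] ++ [w])) = [(p, w)] := rfl
    rw [hz]
    simp only [List.flatMap_cons, List.flatMap_nil, List.append_nil]
    have hb := seg_block cs p (w - p) hp (fun k hk1 hk2 hc => by
      have hkw : k < w := by omega
      have hm := hall k (by omega) hkw hc
      simp at hm
      omega)
    rw [show p + (w - p) = w by omega] at hb
    exact hb
  | cons q rest ih =>
    intro p hpw hp hpair hbnd hcl hall
    have hpq : p < q := (List.pairwise_cons.mp hpair).1 q (by simp)
    have hqw : q < w := hbnd q (by simp)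
    have hsplit : List.range' p (w - p) = List.range' p (q - p) ++ List.range' q (w - q) := by
      have h1 := @List.range'_append_1 p (q - p) (w - q)
      rw [show p + (q - p) = q by omega, show (q - p) + (w - q) = w - p by omega] at h1
      exact h1.symm
    rw [hsplit, List.map_append]
    have hz : ((p :: q :: rest).zip ((q :: rest) ++ [w]))
        = (p, q) :: ((q :: rest).zip (rest ++ [w])) := rfl
    rw [hz, List.flatMap_cons]
    congr 1
    · -- first segment
      have hb := seg_block cs p (q - p) hp (fun k hk1 hk2 hc => by
        have hkw : k < w := by omega
        have hmem := hall k (by omega) hkw hc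
        simp at hmem
        rcases hmem with h | h | h
        · omega
        · omega
        · have := (List.pairwise_cons.mp (List.pairwise_cons.mp hpair).2).1 k h
          omega)
      rw [show p + (q - p) = q by omega] at hb
      exact hb
    · -- remaining segments via IH
      exact ih q hqw (hcl q (by simp)) (List.pairwise_cons.mp hpair).2
        (fun x hx => hbnd x (List.mem_cons_of_mem p hx))
        (fun x hx => hcl x (List.mem_cons_of_mem p hx))
        (fun k hk1 hk2 hc => by
          have hmem := hall k (by omega) hk2 hc
          rcases List.mem_cons.mp hmem with h | h
          · omega
          · exact h)

-- The filtered cloud-column list, in Nat.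
def colsN (cs : List Char) (w : Nat) : List Nat :=
  (List.range w).filter (fun k => decide (cs.getD k ' ' = 'c'))

theorem colsN_mem (cs : List Char) (w : Nat) (x : Nat) :
    x ∈ colsN cs w ↔ x < w ∧ cs.getD x ' ' = 'c' := by
  simp [colsN]

theorem colsN_pairwise (cs : List Char) (w : Nat) : (colsN cs w).Pairwise (· < ·) :=
  List.Pairwise.filter _ List.pairwise_lt_range

theorem cols_eq_map (s : String) (W : Int) (hW : 0 ≤ W)
    (hlen : W.toNat ≤ s.toList.length) :
    (PySem.List.pyRange 0 W 1).filter (fun j => PySem.Str.pyGet? s j == some 'c')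
      = (colsN s.toList W.toNat).map (fun (k : Nat) => (k : Int)) := by
  rw [PySem.List.pyRange_one]
  simp only [Int.sub_zero, zero_add]
  rw [List.filter_map]
  unfold colsN
  congr 1
  apply List.filter_congr
  intro k hk
  rw [List.mem_range] at hk
  have hks : k < s.toList.length := lt_of_lt_of_le hk hlen
  simp only [Function.comp_apply]
  rw [PySem.Str.pyGet?_natCast, List.getElem?_eq_getElem hks]
  simp only [List.getD_eq_getElem?_getD, List.getElem?_eq_getElem hks]
  by_cases h : s.toList[k] = 'c' <;> simp [h]

theorem solveAltRow_eq (s : String) (W : Int) (hlen : W.toNat ≤ s.toList.length) :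
    solveAltRow s W = (List.range W.toNat).map (P s.toList) := by
  by_cases hW : W ≤ 0
  · have hw0 : W.toNat = 0 := by omega
    unfold solveAltRow
    rw [PySem.List.pyRange_one_eq_nil hW]
    simp [hw0]
  · have hW0 : 0 ≤ W := by omega
    unfold solveAltRow
    rw [cols_eq_map s W hW0 hlen]
    rw [PySem.List.foldl_append_eq_flatMap]
    set cs := s.toList
    set w := W.toNat with hw
    have hWw : W = (w : Int) := by omega
    cases hcn : colsN cs w with
    | nil =>
      simp only [hcn, List.map_nil, List.zip_nil_left, List.flatMap_nil, List.append_nil]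
      rw [hWw]
      apply List.ext_getElem (by simp)
      intro j hj _
      have hjw : j < w := by simpa using hj
      simp only [List.getElem_replicate, List.getElem_map, List.getElem_range]
      refine (P_prefix cs j (fun k hk hc => ?_)).symm
      have : k ∈ colsN cs w := (colsN_mem cs w k).mpr ⟨by omega, hc⟩
      rw [hcn] at this
      simp at this
    | cons p rest =>
      have hmem_p : p ∈ colsN cs w := by rw [hcn]; simp
      have hpw : p < w := ((colsN_mem cs w p).mp hmem_p).1
      have hpc : cs.getD p ' ' = 'c' := ((colsN_mem cs w p).mp hmem_p).2
      simp only [hcn, List.map_cons]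
      -- pairs over mapped Int lists = mapped pairs over Nat lists
      have hdrop : (((p : Int) :: rest.map (fun (k : Nat) => (k : Int))).drop 1 ++ [W])
          = (rest ++ [w]).map (fun (k : Nat) => (k : Int)) := by
        simp [hWw]
      rw [hdrop]
      have hzipmap : (((p : Int) :: rest.map (fun (k : Nat) => (k : Int))).zip
            ((rest ++ [w]).map (fun (k : Nat) => (k : Int))))
          = ((p :: rest).zip (rest ++ [w])).map
              (fun pq => ((pq.1 : Int), (pq.2 : Int))) := by
        rw [show ((p : Int) :: rest.map (fun (k : Nat) => (k : Int)))
            = (p :: rest).map (fun (k : Nat) => (k : Int)) by simp]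
        rw [List.zip_map]
        rfl
      rw [hzipmap, List.flatMap_map]
      have hsorted : (p :: rest).Pairwise (· < ·) := by
        rw [← hcn]; exact colsN_pairwise cs w
      have hseg : ((p :: rest).zip (rest ++ [w])).flatMap
            (fun pq => PySem.List.pyRange 0 (((pq.2 : Nat) : Int) - ((pq.1 : Nat) : Int)) 1)
          = ((p :: rest).zip (rest ++ [w])).flatMap (fun pq => segInt pq.1 pq.2) := by
        apply List.flatMap_congr
        intro pq hpq
        rw [PySem.List.pyRange_one]
        unfold segInt
        rw [show ((pq.2 : Int) - (pq.1 : Int) - 0).toNat = pq.2 - pq.1 by omega]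
        simp
      rw [hseg]
      rw [← seg_main cs w rest p hpw hpc hsorted
        (fun x hx => by rw [← hcn] at hx; exact ((colsN_mem cs w x).mp hx).1)
        (fun x hx => by rw [← hcn] at hx; exact ((colsN_mem cs w x).mp hx).2)
        (fun k _ hk2 hc => by rw [← hcn]; exact (colsN_mem cs w k).mpr ⟨hk2, hc⟩)]
      -- now: replicate p (-1) ++ map P (range' p (w-p)) = map P (range w)
      have hrange : List.range w = List.range' 0 p ++ List.range' p (w - p) := by
        have h1 := @List.range'_append_1 0 p (w - p)
        rw [Nat.zero_add, show p + (w - p) = w by omega] at h1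
        rw [List.range_eq_range', ← h1]
      rw [hrange, List.map_append]
      congr 1
      apply List.ext_getElem (by simp)
      intro j hj _
      have hjp : j < p := by simpa using hj
      simp only [List.getElem_replicate, List.getElem_map, List.getElem_range']
      rw [show 0 + 1 * j = j by ring]
      refine (P_prefix cs j (fun k hk hc => ?_)).symm
      have hmem : k ∈ colsN cs w := (colsN_mem cs w k).mpr ⟨by omega, hc⟩
      rw [hcn] at hmem
      rcases List.mem_cons.mp hmem with h | h
      · omega
      · have := (List.pairwise_cons.mp hsorted).1 k h
        omega

theorem solve_alt_eq_rows (H W : Int) (world : List String) :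
    solve_alt H W world
      = (List.range H.toNat).map (fun k => solveAltRow (world.getD k "") W) := by
  unfold solve_alt
  rw [PySem.List.foldl_append_singleton_eq_map, pyRange_zero_toNat, PySem.List.pyRange_one]
  have hmax : (max H 0).toNat = H.toNat := by omega
  simp [List.map_map, Function.comp_def, hmax]

-- ===== VERDICT (by name: the statement is the Claim_ definition above) =====
theorem solve_spec : Claim_equal_solve := by
  intro H W world _ hpre
  unfold Spec_solve
  rw [solve_eq_rows, solve_alt_eq_rows]
  apply List.map_congr_left
  intro k hk
  rw [List.mem_range] at hk
  have hlen : W.toNat ≤ (world.getD k "").toList.length := by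
    by_cases hW : 0 < W
    · have hH : 0 < H := by omega
      obtain ⟨h1, h2⟩ := hpre hH hW
      have hkw : k < world.length := by omega
      have hmem : world.getD k "" ∈ world.take H.toNat := by
        rw [List.getD_eq_getElem world "" hkw]
        have h2 : k < (world.take H.toNat).length := by simp; omega
        have h3 : world[k] = (world.take H.toNat)[k] := by rw [List.getElem_take]
        rw [h3]
        exact List.getElem_mem h2
      have := h2 _ hmem
      omega
    · omega
  rw [rowPass1_eq _ _ hlen, rowPass2_eq, solveAltRow_eq _ _ hlen]
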